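-- pv_equiv track=rewrite | github.com/pypi-data/pypi-mirror-399 | packages/goedels-poetry/goedels_poetry-1.2.4-py3-none-any.whl/goedels_poetry/state.py | _indent_proof_body
-- ===== SOURCE A (Python) =====
-- def _indent_proof_body(proof_body: str, indent: str) -> str:
--     """
--     Indents each line of the proof body.
--
--     Parameters
--     ----------
--     proof_body : str
--         The proof body to indent
--     indent : str
--         The indentation string to add
--
--     Returns
--     -------
--     str
--         The indented proof body
--     """
--     lines = proof_body.split("\n")
--     indented_lines = []
--     for line in lines:
--         if line.strip():  # Only indent non-empty lines
--             indented_lines.append(indent + line)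
--         else:
--             indented_lines.append(line)
--     return "\n".join(indented_lines)
-- ===== SOURCE B (Python) =====
-- def _indent_proof_body(proof_body: str, indent: str) -> str:
--     # Single char-level scan over the text: at each line start, sweep to the next
--     # newline while tracking a blank flag; no intermediate list of lines, no strip().
--     out = []
--     i = 0
--     n = len(proof_body)
--     while True:
--         j = i
--         blank = True
--         while j < n and proof_body[j] != "\n":
--             if not proof_body[j].isspace():
--                 blank = False
--             j += 1
--         if not blank:
--             out.append(indent)
--         out.append(proof_body[i:j])
--         if j == n:
--             return "".join(out)
--         out.append("\n")
--         i = j + 1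
-- ===== Notes on version B (the rewrite author's own statement) =====
-- stated objective: alternative
-- what changed: Replaces split('\n') + per-line strip() + join with a single character-level scan that tracks a blank flag per line and emits the indent in place, never materialising a list of lines.
import Mathlib
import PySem

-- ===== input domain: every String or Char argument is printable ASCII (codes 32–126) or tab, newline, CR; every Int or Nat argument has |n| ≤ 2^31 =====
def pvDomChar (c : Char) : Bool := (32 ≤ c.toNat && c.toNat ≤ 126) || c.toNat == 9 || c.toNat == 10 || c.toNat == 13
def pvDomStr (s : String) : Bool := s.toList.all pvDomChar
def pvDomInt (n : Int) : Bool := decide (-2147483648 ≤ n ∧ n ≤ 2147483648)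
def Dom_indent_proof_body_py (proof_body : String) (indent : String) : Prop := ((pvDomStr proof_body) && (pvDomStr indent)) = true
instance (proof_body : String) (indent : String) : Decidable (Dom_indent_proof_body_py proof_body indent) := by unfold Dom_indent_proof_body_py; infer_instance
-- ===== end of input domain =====

-- B replaces A's split/strip/join pipeline with a single character-level scan
-- that tracks a per-line blank flag and emits the indent in place (alternative
-- decomposition, same asymptotic cost).


-- ===== PORT A =====
-- lines = proof_body.split("\n"); loop appending (indent + line) when line.strip() is truthy; "\n".join(...)
def indent_proof_body_py (proof_body : String) (indent : String) : String :=
  let lines := PySem.Chars.splitOn proof_body.toList ['\n']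
  let indented_lines := lines.foldl
    (fun acc line =>
      if PySem.Chars.strip line ≠ [] then acc ++ [indent.toList ++ line]
      else acc ++ [line]) []
  String.ofList (PySem.Chars.join ['\n'] indented_lines)

-- ===== PORT B =====
-- the inner while loop of Source B: sweep to the next newline, tracking the blank flag;
-- returns (the line, whether it is blank, the remainder after the newline if any)
def pvScanLine : List Char → List Char × Bool × Option (List Char)
  | [] => ([], true, none)
  | c :: t =>
    if c = '\n' then ([], true, some t)
    else
      let r := pvScanLine t
      (c :: r.1, PySem.Chars.isspace c && r.2.1, r.2.2)

theorem pvScanLine_rest_lt : ∀ (s r : List Char), (pvScanLine s).2.2 = some r → r.length < s.length := by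
  intro s
  induction s with
  | nil => intro r hr; simp [pvScanLine] at hr
  | cons c t ih =>
    intro r h
    by_cases hc : c = '\n'
    · simp [pvScanLine, hc] at h
      subst h; simp
    · simp [pvScanLine, hc] at h
      exact Nat.lt_trans (ih r h) (by simp)

-- the outer while loop of Source B: one line per iteration
def pvIndentGo (indent : List Char) (s : List Char) : List Char :=
  match h : (pvScanLine s).2.2 with
  | none =>
      if (pvScanLine s).2.1 then (pvScanLine s).1 else indent ++ (pvScanLine s).1
  | some r =>
      (if (pvScanLine s).2.1 then (pvScanLine s).1 else indent ++ (pvScanLine s).1)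
        ++ '\n' :: pvIndentGo indent r
termination_by s.length
decreasing_by exact pvScanLine_rest_lt s r h

def indent_proof_body_py_alt (proof_body : String) (indent : String) : String :=
  String.ofList (pvIndentGo indent.toList proof_body.toList)

-- ===== PRECONDITION & SPEC =====
def Spec_indent_proof_body_py (proof_body : String) (indent : String) (out : String) : Prop := out = indent_proof_body_py_alt proof_body indent
instance (proof_body : String) (indent : String) (out : String) : Decidable (Spec_indent_proof_body_py proof_body indent out) := by unfold Spec_indent_proof_body_py; infer_instance

-- ===== CLAIM (what is proved, stated in full; the proofs are below) =====
def Claim_equal_indent_proof_body_py : Prop := ∀ (proof_body : String) (indent : String), Dom_indent_proof_body_py proof_body indent → Spec_indent_proof_body_py proof_body indent (indent_proof_body_py proof_body indent)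

-- ===== LEMMAS AND PROOFS =====

-- splitOn.go with fuel ≥ length of the text is fuel-insensitive
theorem pvGo_fuel : ∀ (l : List Char) (f₁ f₂ : Nat) (cur : List Char) (acc : List (List Char)),
    l.length ≤ f₁ → l.length ≤ f₂ →
    PySem.Chars.splitOn.go ['\n'] f₁ l cur acc = PySem.Chars.splitOn.go ['\n'] f₂ l cur acc := by
  intro l
  induction l with
  | nil =>
    intro f₁ f₂ cur acc _ _
    cases f₁ <;> cases f₂ <;> simp [PySem.Chars.splitOn.go]
  | cons c t ih =>
    intro f₁ f₂ cur acc h₁ h₂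
    cases f₁ with
    | zero => simp at h₁
    | succ g₁ =>
      cases f₂ with
      | zero => simp at h₂
      | succ g₂ =>
        by_cases hc : c = '\n'
        · subst hc
          simp only [PySem.Chars.splitOn.go, List.isPrefixOf, BEq.rfl, Bool.and_true]
          simp
          exact ih g₁ g₂ [] (cur.reverse :: acc) (by simpa using Nat.le_of_succ_le_succ h₁)
            (by simpa using Nat.le_of_succ_le_succ h₂)
        · rw [show PySem.Chars.splitOn.go ['\n'] (g₁+1) (c::t) cur acc
              = PySem.Chars.splitOn.go ['\n'] g₁ t (c::cur) acc by
            simp [PySem.Chars.splitOn.go, List.isPrefixOf, Ne.symm hc]]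
          rw [show PySem.Chars.splitOn.go ['\n'] (g₂+1) (c::t) cur acc
              = PySem.Chars.splitOn.go ['\n'] g₂ t (c::cur) acc by
            simp [PySem.Chars.splitOn.go, List.isPrefixOf, Ne.symm hc]]
          exact ih g₁ g₂ (c::cur) acc (Nat.le_of_succ_le_succ h₁) (Nat.le_of_succ_le_succ h₂)

-- a newline-free text: go finishes with a single further piece
theorem pvGo_no_nl : ∀ (l : List Char), '\n' ∉ l → ∀ (f : Nat) (cur : List Char) (acc : List (List Char)),
    l.length ≤ f →
    PySem.Chars.splitOn.go ['\n'] f l cur acc = ((cur.reverse ++ l) :: acc).reverse := by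
  intro l
  induction l with
  | nil =>
    intro _ f cur acc _
    cases f <;> simp [PySem.Chars.splitOn.go]
  | cons c t ih =>
    intro h f cur acc hf
    have hc : c ≠ '\n' := fun e => h (e ▸ List.mem_cons_self ..)
    cases f with
    | zero => simp at hf
    | succ g =>
      rw [show PySem.Chars.splitOn.go ['\n'] (g+1) (c::t) cur acc
            = PySem.Chars.splitOn.go ['\n'] g t (c::cur) acc by
        simp [PySem.Chars.splitOn.go, List.isPrefixOf, Ne.symm hc]]
      rw [ih (fun m => h (List.mem_cons_of_mem _ m)) g (c::cur) acc (Nat.le_of_succ_le_succ hf)]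
      simp

-- a text starting with a newline-free line: go emits it and continues after the newline
theorem pvGo_split : ∀ (a : List Char), '\n' ∉ a → ∀ (b : List Char) (f : Nat) (cur : List Char) (acc : List (List Char)),
    (a ++ '\n' :: b).length ≤ f →
    PySem.Chars.splitOn.go ['\n'] f (a ++ '\n' :: b) cur acc
      = PySem.Chars.splitOn.go ['\n'] b.length b [] ((cur.reverse ++ a) :: acc) := by
  intro a
  induction a with
  | nil =>
    intro _ b f cur acc hf
    cases f with
    | zero => simp at hf
    | succ g =>
      simp only [List.nil_append]
      rw [show PySem.Chars.splitOn.go ['\n'] (g+1) ('\n'::b) cur acc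
            = PySem.Chars.splitOn.go ['\n'] g b [] (cur.reverse :: acc) by
        simp [PySem.Chars.splitOn.go, List.isPrefixOf]]
      rw [pvGo_fuel b g b.length [] (cur.reverse :: acc) (by simpa using Nat.le_of_succ_le_succ hf) (le_refl _)]
      simp
  | cons c a' ih =>
    intro h b f cur acc hf
    have hc : c ≠ '\n' := fun e => h (e ▸ List.mem_cons_self ..)
    cases f with
    | zero => simp at hf
    | succ g =>
      rw [show PySem.Chars.splitOn.go ['\n'] (g+1) ((c::a') ++ '\n'::b) cur acc
            = PySem.Chars.splitOn.go ['\n'] g (a' ++ '\n'::b) (c::cur) acc by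
        simp [PySem.Chars.splitOn.go, List.isPrefixOf, Ne.symm hc]]
      rw [ih (fun m => h (List.mem_cons_of_mem _ m)) b g (c::cur) acc (by simpa using Nat.le_of_succ_le_succ hf)]
      simp

-- acc is just prepended (reversed) to the final result
theorem pvGo_acc : ∀ (f : Nat) (l cur : List Char) (acc : List (List Char)),
    PySem.Chars.splitOn.go ['\n'] f l cur acc
      = acc.reverse ++ PySem.Chars.splitOn.go ['\n'] f l cur [] := by
  intro f
  induction f with
  | zero => intro l cur acc; simp [PySem.Chars.splitOn.go]
  | succ g ih =>
    intro l cur acc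
    cases l with
    | nil => simp [PySem.Chars.splitOn.go]
    | cons c t =>
      by_cases hc : c = '\n'
      · subst hc
        have hstep : ∀ acc', PySem.Chars.splitOn.go ['\n'] (g+1) ('\n'::t) cur acc'
              = PySem.Chars.splitOn.go ['\n'] g t [] (cur.reverse :: acc') := fun acc' => by
          simp [PySem.Chars.splitOn.go, List.isPrefixOf]
        rw [hstep acc, hstep [], ih t [] (cur.reverse :: acc), ih t [] [cur.reverse]]
        simp
      · have hstep : ∀ acc', PySem.Chars.splitOn.go ['\n'] (g+1) (c::t) cur acc'
              = PySem.Chars.splitOn.go ['\n'] g t (c::cur) acc' := fun acc' => by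
          simp [PySem.Chars.splitOn.go, List.isPrefixOf, Ne.symm hc]
        rw [hstep acc, hstep []]
        exact ih t (c::cur) acc

theorem pvSplitOn_no_nl (s : List Char) (h : '\n' ∉ s) :
    PySem.Chars.splitOn s ['\n'] = [s] := by
  unfold PySem.Chars.splitOn
  rw [pvGo_no_nl s h (s.length + 1) [] [] (Nat.le_succ _)]
  simp

theorem pvSplitOn_cons (a b : List Char) (h : '\n' ∉ a) :
    PySem.Chars.splitOn (a ++ '\n' :: b) ['\n'] = a :: PySem.Chars.splitOn b ['\n'] := by
  unfold PySem.Chars.splitOn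
  rw [pvGo_split a h b ((a ++ '\n'::b).length + 1) [] [] (Nat.le_succ _)]
  rw [pvGo_acc b.length b [] [List.reverse [] ++ a]]
  rw [pvGo_fuel b b.length (b.length + 1) [] [] (le_refl _) (Nat.le_succ _)]
  simp

-- first-newline decomposition
theorem pvFirstNL (s : List Char) (h : '\n' ∈ s) :
    ∃ a b, '\n' ∉ a ∧ s = a ++ '\n' :: b := by
  induction s with
  | nil => simp at h
  | cons c t ih =>
    by_cases hc : c = '\n'
    · exact ⟨[], t, by simp, by simp [hc]⟩
    · have ht : '\n' ∈ t := by
        rcases List.mem_cons.1 h with h1 | h1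
        · exact absurd h1.symm hc
        · exact h1
      obtain ⟨a, b, ha, rfl⟩ := ih ht
      exact ⟨c :: a, b, by simp [Ne.symm hc, ha], by simp⟩

-- every line of a split decomposition (used for join_cons_cons): splitOn is never empty
theorem pvSplitOn_ne_nil (s : List Char) : PySem.Chars.splitOn s ['\n'] ≠ [] := by
  by_cases h : '\n' ∈ s
  · obtain ⟨a, b, ha, rfl⟩ := pvFirstNL s h
    rw [pvSplitOn_cons a b ha]; simp
  · rw [pvSplitOn_no_nl s h]; simp

-- strip-emptiness is the all-whitespace test
theorem pvStrip_nil_iff (l : List Char) :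
    PySem.Chars.strip l = [] ↔ l.all PySem.Chars.isspace = true := by
  unfold PySem.Chars.strip PySem.Chars.rstrip PySem.Chars.lstrip
  constructor
  · intro h
    rw [List.reverse_eq_nil_iff, List.dropWhile_eq_nil_iff] at h
    rw [List.all_eq_true]
    intro c hc
    by_cases hsp : PySem.Chars.isspace c = true
    · exact hsp
    · exfalso
      -- c survives the left strip, so the reversed remainder has a non-space element
      have hc' : c ∈ List.takeWhile PySem.Chars.isspace l ++ List.dropWhile PySem.Chars.isspace l := by
        rw [List.takeWhile_append_dropWhile]; exact hc
      have hmem : c ∈ List.dropWhile PySem.Chars.isspace l := by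
        rcases List.mem_append.1 hc' with h1 | h2
        · exact absurd (List.mem_takeWhile_imp h1) hsp
        · exact h2
      exact hsp (h c (List.mem_reverse.2 hmem))
  · intro h
    have h1 : List.dropWhile PySem.Chars.isspace l = [] :=
      List.dropWhile_eq_nil_iff.2 fun x hx =>
        List.all_eq_true.1 h x hx
    simp [h1]


-- pvScanLine on a newline-free text
theorem pvScan_no_nl (s : List Char) (h : '\n' ∉ s) :
    pvScanLine s = (s, s.all PySem.Chars.isspace, none) := by
  induction s with
  | nil => simp [pvScanLine]
  | cons c t ih =>
    have hc : c ≠ '\n' := fun e => h (e ▸ List.mem_cons_self ..)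
    simp [pvScanLine, hc, ih (fun m => h (List.mem_cons_of_mem _ m))]

-- pvScanLine up to the first newline
theorem pvScan_nl (a b : List Char) (h : '\n' ∉ a) :
    pvScanLine (a ++ '\n' :: b) = (a, a.all PySem.Chars.isspace, some b) := by
  induction a with
  | nil => simp [pvScanLine]
  | cons c a' ih =>
    have hc : c ≠ '\n' := fun e => h (e ▸ List.mem_cons_self ..)
    simp [pvScanLine, hc, ih (fun m => h (List.mem_cons_of_mem _ m))]

-- A's foldl of conditional appends is a map
theorem pvFoldl_map (ind : List Char) : ∀ (lines : List (List Char)) (acc : List (List Char)),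
    lines.foldl (fun acc line =>
        if PySem.Chars.strip line ≠ [] then acc ++ [ind ++ line] else acc ++ [line]) acc
      = acc ++ lines.map (fun line => if PySem.Chars.strip line ≠ [] then ind ++ line else line) := by
  intro lines
  induction lines with
  | nil => intro acc; simp
  | cons l t ih =>
    intro acc
    by_cases h : PySem.Chars.strip l = []
    · rw [List.foldl_cons, if_neg (by simp [h]), ih, List.map_cons, if_neg (by simp [h])]
      simp
    · rw [List.foldl_cons, if_pos h, ih, List.map_cons, if_pos h]
      simp

-- the per-line transforms agree
theorem pvLine_eq (ind l : List Char) :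
    (if PySem.Chars.strip l ≠ [] then ind ++ l else l)
      = (if l.all PySem.Chars.isspace then l else ind ++ l) := by
  by_cases h : l.all PySem.Chars.isspace = true
  · simp [h, (pvStrip_nil_iff l).2 h]
  · have : PySem.Chars.strip l ≠ [] := fun e => h ((pvStrip_nil_iff l).1 e)
    simp [h, this]

-- one unfolding of B's outer loop
theorem pvIndentGo_eq (ind s : List Char) : pvIndentGo ind s =
    (if (pvScanLine s).2.1 then (pvScanLine s).1 else ind ++ (pvScanLine s).1) ++
      (match (pvScanLine s).2.2 with | none => [] | some r => '\n' :: pvIndentGo ind r) := by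
  rw [pvIndentGo]
  split <;> rename_i h <;> simp [h]

-- the main bridge: join of the mapped split equals B's single scan
theorem pvMain (ind : List Char) : ∀ (s : List Char),
    PySem.Chars.join ['\n'] ((PySem.Chars.splitOn s ['\n']).map
        (fun line => if PySem.Chars.strip line ≠ [] then ind ++ line else line))
      = pvIndentGo ind s := by
  intro s
  induction hn : s.length using Nat.strong_induction_on generalizing s with
  | _ n ih =>
    by_cases h : '\n' ∈ s
    · obtain ⟨a, b, ha, rfl⟩ := pvFirstNL s h
      rw [pvSplitOn_cons a b ha, List.map_cons]
      obtain ⟨b0, bt, hb⟩ := List.exists_cons_of_ne_nil (pvSplitOn_ne_nil b)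
      have ihb := ih b.length (by subst hn; simp; omega) b rfl
      rw [hb, List.map_cons, PySem.Chars.join_cons_cons]
      rw [hb, List.map_cons] at ihb
      rw [ihb, pvIndentGo_eq ind (a ++ '\n' :: b)]
      simp only [pvScan_nl a b ha]
      rw [pvLine_eq]
      simp
    · rw [pvSplitOn_no_nl s h, List.map_cons, List.map_nil, PySem.Chars.join_singleton]
      rw [pvIndentGo_eq]
      simp only [pvScan_no_nl s h]
      rw [pvLine_eq]
      simp

-- ===== VERDICT (by name: the statement is the Claim_ definition above) =====
theorem indent_proof_body_py_spec : Claim_equal_indent_proof_body_py := by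
  intro proof_body indent _
  unfold Spec_indent_proof_body_py
  rw [show indent_proof_body_py proof_body indent
        = String.ofList (PySem.Chars.join ['\n']
            ((PySem.Chars.splitOn proof_body.toList ['\n']).foldl
              (fun acc line =>
                if PySem.Chars.strip line ≠ [] then acc ++ [indent.toList ++ line]
                else acc ++ [line]) [])) from rfl]
  rw [pvFoldl_map, List.nil_append, pvMain indent.toList proof_body.toList]
  rfl
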